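-- pv_equiv track=rewrite | github.com/dingz212445/cit590-hw5_squarelotron | squarelotron.py | main_diagonal_flip
-- ===== SOURCE A (Python) =====
-- import copy
--
-- def main_diagonal_flip(squarelotron, ring):
--     fliped_squarelotron = copy.deepcopy(squarelotron)
--     if ring == 'o':
--         for i in range(0, 5):
--             fliped_squarelotron[0][i], fliped_squarelotron[i][0] = \
--                                                fliped_squarelotron[i][0], fliped_squarelotron[0][i]
--         for i in range(1, 5):
--             fliped_squarelotron[4][i], fliped_squarelotron[i][4] = \
--                                                fliped_squarelotron[i][4], fliped_squarelotron[4][i]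
--     elif ring == 'i':
--         for i in range(1, 4):
--             fliped_squarelotron[1][i], fliped_squarelotron[i][1] = \
--                                                fliped_squarelotron[i][1], fliped_squarelotron[1][i]
--         for i in range(2, 4):
--             fliped_squarelotron[3][i], fliped_squarelotron[i][3] = \
--                                                fliped_squarelotron[i][3], fliped_squarelotron[3][i]
--     return fliped_squarelotron
-- ===== SOURCE B (Python) =====
-- import copy
--
-- def main_diagonal_flip(squarelotron, ring):
--     grid = copy.deepcopy(squarelotron)
--     if ring == 'o':
--         coords = [(i, j) for i in range(5) for j in range(5)
--                   if i in (0, 4) or j in (0, 4)]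
--     elif ring == 'i':
--         coords = [(i, j) for i in range(1, 4) for j in range(1, 4)
--                   if i in (1, 3) or j in (1, 3)]
--     else:
--         coords = []
--     for (i, j) in coords:
--         grid[i][j] = squarelotron[j][i]
--     return grid
-- ===== Notes on version B (the rewrite author's own statement) =====
-- stated objective: simpler
-- what changed: Instead of two loops of in-place pair swaps on the mutating copy, B builds the explicit coordinate set of the selected ring and writes grid[i][j] = original[j][i] for each, reading only from the unmutated original.
import Mathlib
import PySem

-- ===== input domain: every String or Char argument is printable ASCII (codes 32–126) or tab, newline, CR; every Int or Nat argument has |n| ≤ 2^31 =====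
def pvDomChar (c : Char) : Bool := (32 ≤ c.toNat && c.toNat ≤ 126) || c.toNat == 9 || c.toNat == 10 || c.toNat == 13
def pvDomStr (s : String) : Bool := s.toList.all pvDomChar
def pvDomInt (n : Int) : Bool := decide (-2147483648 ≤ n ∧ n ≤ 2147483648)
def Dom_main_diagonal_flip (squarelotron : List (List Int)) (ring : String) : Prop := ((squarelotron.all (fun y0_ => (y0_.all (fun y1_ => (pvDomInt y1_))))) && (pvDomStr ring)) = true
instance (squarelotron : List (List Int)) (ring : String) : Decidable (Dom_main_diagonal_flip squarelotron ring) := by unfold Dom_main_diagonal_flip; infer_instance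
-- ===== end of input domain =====

set_option maxHeartbeats 2000000


-- B replaces A's two loops of in-place swaps on the mutating copy by one pass over the
-- explicit coordinate set of the selected ring, writing grid[i][j] := original[j][i]
-- from the unmutated original (objective: simpler decomposition; same cost).

-- ===== PORT A =====
-- read cell (i,j); Pre_ keeps all reads in range, so the default is never the result
def pvGet2 (m : List (List Int)) (i j : Nat) : Int := (m.getD i []).getD j 0
-- write cell (i,j) (Python `m[i][j] = v` with in-range nonnegative indices)
def pvSet2 (m : List (List Int)) (i j : Nat) (v : Int) : List (List Int) :=
  m.set i ((m.getD i []) |>.set j v)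
-- Python `m[r1][c1], m[r2][c2] = m[r2][c2], m[r1][c1]`: RHS read first, assignments left to right
def pvSwap (m : List (List Int)) (r1 c1 r2 c2 : Nat) : List (List Int) :=
  let x := pvGet2 m r2 c2
  let y := pvGet2 m r1 c1
  pvSet2 (pvSet2 m r1 c1 x) r2 c2 y

def main_diagonal_flip (squarelotron : List (List Int)) (ring : String) : List (List Int) :=
  let fliped := squarelotron   -- copy.deepcopy (Lean lists are immutable)
  if ring == "o" then
    let fliped := (PySem.List.pyRange 0 5 1).foldl (fun m i => pvSwap m 0 i.toNat i.toNat 0) fliped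
    (PySem.List.pyRange 1 5 1).foldl (fun m i => pvSwap m 4 i.toNat i.toNat 4) fliped
  else if ring == "i" then
    let fliped := (PySem.List.pyRange 1 4 1).foldl (fun m i => pvSwap m 1 i.toNat i.toNat 1) fliped
    (PySem.List.pyRange 2 4 1).foldl (fun m i => pvSwap m 3 i.toNat i.toNat 3) fliped
  else fliped

-- ===== PORT B =====
-- the list comprehensions of Source B building the ring's coordinate set
def pvCoordsO : List (Nat × Nat) :=
  (List.range 5).flatMap (fun i =>
    (List.range 5).filterMap (fun j =>
      if i = 0 ∨ i = 4 ∨ j = 0 ∨ j = 4 then some (i, j) else none))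
def pvCoordsI : List (Nat × Nat) :=
  ((List.range 3).map (· + 1)).flatMap (fun i =>
    ((List.range 3).map (· + 1)).filterMap (fun j =>
      if i = 1 ∨ i = 3 ∨ j = 1 ∨ j = 3 then some (i, j) else none))

def main_diagonal_flip_alt (squarelotron : List (List Int)) (ring : String) : List (List Int) :=
  let coords := if ring == "o" then pvCoordsO else if ring == "i" then pvCoordsI else []
  coords.foldl (fun g p => pvSet2 g p.1 p.2 (pvGet2 squarelotron p.2 p.1)) squarelotron

-- ===== PRECONDITION & SPEC =====
-- Pre_ is exactly A's domain: outside it (a grid too small for the chosen ring) Python A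
-- raises IndexError; for any other ring string A is total and Pre_ imposes nothing.
def Pre_main_diagonal_flip (squarelotron : List (List Int)) (ring : String) : Prop :=
  (ring = "o" → 5 ≤ squarelotron.length ∧ ∀ r ∈ squarelotron.take 5, 5 ≤ r.length) ∧
  (ring = "i" → 4 ≤ squarelotron.length ∧ ∀ r ∈ (squarelotron.drop 1).take 3, 4 ≤ r.length)
instance (squarelotron : List (List Int)) (ring : String) : Decidable (Pre_main_diagonal_flip squarelotron ring) := by unfold Pre_main_diagonal_flip; infer_instance

def pvWitness_main_diagonal_flip : List (List Int) × String :=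
  ([[1,2,3,4,5],[6,7,8,9,10],[11,12,13,14,15],[16,17,18,19,20],[21,22,23,24,25]], "o")

def Spec_main_diagonal_flip (squarelotron : List (List Int)) (ring : String) (out : List (List Int)) : Prop := out = main_diagonal_flip_alt squarelotron ring
instance (squarelotron : List (List Int)) (ring : String) (out : List (List Int)) : Decidable (Spec_main_diagonal_flip squarelotron ring out) := by unfold Spec_main_diagonal_flip; infer_instance

-- ===== CLAIM (what is proved, stated in full; the proofs are below) =====
def Claim_equal_main_diagonal_flip : Prop := ∀ (squarelotron : List (List Int)) (ring : String), Dom_main_diagonal_flip squarelotron ring → Pre_main_diagonal_flip squarelotron ring → Spec_main_diagonal_flip squarelotron ring (main_diagonal_flip squarelotron ring)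

-- ===== LEMMAS AND PROOFS =====

-- ===== VERDICT (by name: the statement is the Claim_ definition above) =====
theorem main_diagonal_flip_spec : Claim_equal_main_diagonal_flip := by
  intro sq ring _ hpre
  unfold Spec_main_diagonal_flip
  obtain ⟨ho, hi⟩ := hpre
  by_cases eo : ring = "o"
  · subst eo
    obtain ⟨hlen, hrows⟩ := ho rfl
    clear hi
    rcases sq with _ | ⟨r0, sq⟩; · simp at hlen
    rcases sq with _ | ⟨r1, sq⟩; · simp at hlen
    rcases sq with _ | ⟨r2, sq⟩; · simp at hlen
    rcases sq with _ | ⟨r3, sq⟩; · simp at hlen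
    rcases sq with _ | ⟨r4, sq⟩; · simp at hlen
    simp only [List.take, List.mem_cons, List.not_mem_nil, or_false, forall_eq_or_imp,
      forall_eq] at hrows
    obtain ⟨h0, h1, h2, h3, h4⟩ := hrows
    rcases r0 with _ | ⟨a00, r0⟩; · simp at h0
    rcases r0 with _ | ⟨a01, r0⟩; · simp at h0
    rcases r0 with _ | ⟨a02, r0⟩; · simp at h0
    rcases r0 with _ | ⟨a03, r0⟩; · simp at h0
    rcases r0 with _ | ⟨a04, r0⟩; · simp at h0
    rcases r1 with _ | ⟨a10, r1⟩; · simp at h1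
    rcases r1 with _ | ⟨a11, r1⟩; · simp at h1
    rcases r1 with _ | ⟨a12, r1⟩; · simp at h1
    rcases r1 with _ | ⟨a13, r1⟩; · simp at h1
    rcases r1 with _ | ⟨a14, r1⟩; · simp at h1
    rcases r2 with _ | ⟨a20, r2⟩; · simp at h2
    rcases r2 with _ | ⟨a21, r2⟩; · simp at h2
    rcases r2 with _ | ⟨a22, r2⟩; · simp at h2
    rcases r2 with _ | ⟨a23, r2⟩; · simp at h2
    rcases r2 with _ | ⟨a24, r2⟩; · simp at h2
    rcases r3 with _ | ⟨a30, r3⟩; · simp at h3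
    rcases r3 with _ | ⟨a31, r3⟩; · simp at h3
    rcases r3 with _ | ⟨a32, r3⟩; · simp at h3
    rcases r3 with _ | ⟨a33, r3⟩; · simp at h3
    rcases r3 with _ | ⟨a34, r3⟩; · simp at h3
    rcases r4 with _ | ⟨a40, r4⟩; · simp at h4
    rcases r4 with _ | ⟨a41, r4⟩; · simp at h4
    rcases r4 with _ | ⟨a42, r4⟩; · simp at h4
    rcases r4 with _ | ⟨a43, r4⟩; · simp at h4
    rcases r4 with _ | ⟨a44, r4⟩; · simp at h4
    simp [main_diagonal_flip, main_diagonal_flip_alt, pvCoordsO, pvSwap, pvSet2, pvGet2,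
      PySem.List.pyRange, List.range, List.range.loop]
  · by_cases ei : ring = "i"
    · subst ei
      obtain ⟨hlen, hrows⟩ := hi rfl
      clear ho
      rcases sq with _ | ⟨r0, sq⟩; · simp at hlen
      rcases sq with _ | ⟨r1, sq⟩; · simp at hlen
      rcases sq with _ | ⟨r2, sq⟩; · simp at hlen
      rcases sq with _ | ⟨r3, sq⟩; · simp at hlen
      simp only [List.drop, List.take, List.mem_cons, List.not_mem_nil, or_false,
        forall_eq_or_imp, forall_eq] at hrows
      obtain ⟨h1, h2, h3⟩ := hrows
      rcases r1 with _ | ⟨a10, r1⟩; · simp at h1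
      rcases r1 with _ | ⟨a11, r1⟩; · simp at h1
      rcases r1 with _ | ⟨a12, r1⟩; · simp at h1
      rcases r1 with _ | ⟨a13, r1⟩; · simp at h1
      rcases r2 with _ | ⟨a20, r2⟩; · simp at h2
      rcases r2 with _ | ⟨a21, r2⟩; · simp at h2
      rcases r2 with _ | ⟨a22, r2⟩; · simp at h2
      rcases r2 with _ | ⟨a23, r2⟩; · simp at h2
      rcases r3 with _ | ⟨a30, r3⟩; · simp at h3
      rcases r3 with _ | ⟨a31, r3⟩; · simp at h3
      rcases r3 with _ | ⟨a32, r3⟩; · simp at h3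
      rcases r3 with _ | ⟨a33, r3⟩; · simp at h3
      simp [main_diagonal_flip, main_diagonal_flip_alt, pvCoordsI, pvSwap, pvSet2, pvGet2,
        PySem.List.pyRange, List.range, List.range.loop]
    · simp [main_diagonal_flip, main_diagonal_flip_alt, beq_iff_eq, eo, ei]
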